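-- pv_equiv track=rewrite | github.com/alextsah/Personal | ECSE211_A2_260958121.py | find_three_smallest_even
-- ===== SOURCE A (Python) =====
-- def find_three_smallest_even(nums: list[int]):
--     """
--     Return the three smallest even numbers (if any) in the input list, allowing duplicates, eg,
--
--     [1, 2] -> [2]
--     [1, 2, 2, 3, 4, 5, 6, 7, 8] -> [2, 2, 4]
--     """
--     OUTPUT_SIZE = 3
--     INF = float("inf")
--     nums.sort()
--     smallest_numbers: list[int] = []
--     used_indices: list[int] = []
--
--     for _ in range(OUTPUT_SIZE):
--         smallest_even = INF
--         for i in range(len(nums)):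
--             if i not in used_indices and nums[i] < smallest_even and nums[i] % 2 == 0:
--                 smallest_even = nums[i]
--                 used_indices.append(i)
--         if smallest_even < INF:
--             smallest_numbers.append(smallest_even)
--
--     return smallest_numbers
-- ===== SOURCE B (Python) =====
-- def find_three_smallest_even(nums: list[int]):
--     # Single linear pass keeping the (up to) three smallest even values, ascending.
--     # Note: unlike A, this does not sort `nums` in place.
--     best: list[int] = []
--     for x in nums:
--         if x % 2 == 0:
--             i = 0
--             while i < len(best) and best[i] <= x:
--                 i += 1
--             best.insert(i, x)
--             if len(best) > 3:
--                 best.pop()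
--     return best
-- ===== Notes on version B (the rewrite author's own statement) =====
-- stated objective: faster
-- what changed: Replaces A's full in-place sort followed by three selection passes with a single linear scan that maintains the up-to-three smallest even values in a bounded sorted buffer (A also sorts nums in place; B does not mutate its argument).
import Mathlib
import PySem

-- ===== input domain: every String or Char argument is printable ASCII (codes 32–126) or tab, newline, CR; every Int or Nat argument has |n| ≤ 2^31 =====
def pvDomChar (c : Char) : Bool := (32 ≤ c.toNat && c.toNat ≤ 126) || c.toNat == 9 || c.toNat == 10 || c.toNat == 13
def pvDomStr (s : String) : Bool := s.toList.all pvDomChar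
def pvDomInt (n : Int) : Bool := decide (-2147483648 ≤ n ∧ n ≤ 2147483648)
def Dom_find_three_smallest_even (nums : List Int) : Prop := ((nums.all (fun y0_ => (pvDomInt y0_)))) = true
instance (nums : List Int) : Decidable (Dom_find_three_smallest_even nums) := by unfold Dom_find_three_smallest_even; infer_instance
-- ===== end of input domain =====

-- B replaces A's full sort plus three selection passes by one linear scan keeping the up-to-three
-- smallest even values (objective: faster). A sorts `nums` in place (caller-visible mutation);
-- B does not mutate its argument; the equivalence proved here is about the RETURN value.

-- ===== PORT A =====
-- condition `i not in used_indices and nums[i] < smallest_even and nums[i] % 2 == 0`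
-- (smallest_even = none stands for float("inf"), which every int is below)
def ftsCond (se : Option Int) (used : List Int) (i v : Int) : Bool :=
  !(used.contains i) && (match se with | none => true | some m => decide (v < m))
    && (PySem.Int.mod v 2 == 0)

def ftsStep (st : Option Int × List Int) (p : Int × Int) : Option Int × List Int :=
  if ftsCond st.1 st.2 p.1 p.2 then (some p.2, st.2 ++ [p.1]) else st

-- inner `for i in range(len(nums))` loop; i is always in range, so the pyGetD default is dead
def ftsInner (s : List Int) (used : List Int) : Option Int × List Int :=
  (PySem.List.pyRange 0 s.length 1).foldl
    (fun st i => ftsStep st (i, PySem.List.pyGetD s i 0)) (none, used)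

def find_three_smallest_even (nums : List Int) : List Int :=
  let s := PySem.List.sorted nums (fun x => x) false   -- nums.sort()
  ((PySem.List.pyRange 0 3 1).foldl
    (fun (st : List Int × List Int) _ =>
      let r := ftsInner s st.2
      match r.1 with                                    -- `if smallest_even < INF`
      | some v => (st.1 ++ [v], r.2)
      | none => (st.1, r.2)) ([], [])).1

-- ===== PORT B =====
-- `while i < len(best) and best[i] <= x: i += 1; best.insert(i, x)`
def insEven (x : Int) : List Int → List Int
  | [] => [x]
  | y :: t => if y ≤ x then y :: insEven x t else x :: y :: t

def find_three_smallest_even_alt (nums : List Int) : List Int :=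
  nums.foldl (fun best x =>
    if PySem.Int.mod x 2 == 0 then
      let b := insEven x best
      if 3 < b.length then b.dropLast else b            -- best.pop()
    else best) []

-- ===== PRECONDITION & SPEC =====
def Spec_find_three_smallest_even (nums : List Int) (out : List Int) : Prop := out = find_three_smallest_even_alt nums
instance (nums : List Int) (out : List Int) : Decidable (Spec_find_three_smallest_even nums out) := by unfold Spec_find_three_smallest_even; infer_instance

-- ===== CLAIM (what is proved, stated in full; the proofs are below) =====
def Claim_equal_find_three_smallest_even : Prop := ∀ (nums : List Int), Dom_find_three_smallest_even nums → Spec_find_three_smallest_even nums (find_three_smallest_even nums)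

-- ===== LEMMAS AND PROOFS =====

-- the even-entry test, applied to (index, value) pairs
def evp (p : Int × Int) : Bool := PySem.Int.mod p.2 2 == 0

-- insertion sort used as the canonical form both sides are reduced to
def isort (l : List Int) : List Int := l.foldl (fun acc x => insEven x acc) []

def evens (l : List Int) : List Int := l.filter (fun x => PySem.Int.mod x 2 == 0)

-- ---- generic list facts about insEven ----
lemma length_insEven (x : Int) (b : List Int) : (insEven x b).length = b.length + 1 := by
  induction b with
  | nil => rfl
  | cons y t ih => simp only [insEven]; split <;> simp [ih]

lemma insEven_perm (x : Int) (b : List Int) : (insEven x b).Perm (x :: b) := by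
  induction b with
  | nil => rfl
  | cons y t ih =>
    simp only [insEven]; split
    · exact ((ih.cons y).trans (List.Perm.swap x y t))
    · rfl

lemma insEven_pairwise (x : Int) (b : List Int) (h : b.Pairwise (· ≤ ·)) :
    (insEven x b).Pairwise (· ≤ ·) := by
  induction b with
  | nil => simp [insEven]
  | cons y t ih =>
    rcases List.pairwise_cons.mp h with ⟨hy, ht⟩
    simp only [insEven]; split
    · rename_i hyx
      refine List.pairwise_cons.mpr ⟨?_, ih ht⟩
      intro z hz
      rcases List.mem_cons.mp ((insEven_perm x t).mem_iff.mp hz) with hz | hz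
      · omega
      · exact hy z hz
    · rename_i hyx
      refine List.pairwise_cons.mpr ⟨?_, h⟩
      intro z hz
      rcases hz with _ | hz
      · omega
      · exact le_trans (by omega) (hy z (by assumption))

lemma take_insEven (b : List Int) (x : Int) (n : Nat) :
    (insEven x b).take n = (insEven x (b.take n)).take n := by
  induction b generalizing n with
  | nil => simp
  | cons y t ih =>
    cases n with
    | zero => simp
    | succ m =>
      simp only [insEven, List.take_succ_cons]
      split
      · simp [insEven, *, List.take_succ_cons, ih m]
      · simp only [insEven, *, List.take_succ_cons, if_neg]
        congr 1
        cases m with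
        | zero => simp
        | succ k => simp [List.take_succ_cons, List.take_take]

-- ---- B-side: the fold keeps take 3 of the insertion sort of the evens seen so far ----
lemma isort_concat (E : List Int) (x : Int) : isort (E ++ [x]) = insEven x (isort E) := by
  simp [isort]

lemma step_take3 (c : List Int) (x : Int) :
    (if 3 < (insEven x (c.take 3)).length then (insEven x (c.take 3)).dropLast
     else insEven x (c.take 3)) = (insEven x c).take 3 := by
  rw [take_insEven]
  by_cases h : 3 ≤ c.length
  · have hl : (insEven x (c.take 3)).length = 4 := by
      rw [length_insEven, List.length_take]; omega
    rw [if_pos (by omega), List.dropLast_eq_take, hl]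
  · have hl : (insEven x (c.take 3)).length ≤ 3 := by
      rw [length_insEven, List.length_take]; omega
    rw [if_neg (by omega), List.take_of_length_le hl]

lemma alt_inv (l : List Int) : ∀ (E : List Int),
    l.foldl (fun best x =>
      if PySem.Int.mod x 2 == 0 then
        let b := insEven x best
        if 3 < b.length then b.dropLast else b
      else best) ((isort E).take 3) = (isort (E ++ evens l)).take 3 := by
  induction l with
  | nil => intro E; simp [evens]
  | cons x t ih =>
    intro E
    by_cases hx : (PySem.Int.mod x 2 == 0) = true
    · simp only [List.foldl_cons, hx, if_pos]
      have : (let b := insEven x ((isort E).take 3);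
              if 3 < b.length then b.dropLast else b) = (isort (E ++ [x])).take 3 := by
        rw [isort_concat]; exact step_take3 (isort E) x
      rw [this, ih (E ++ [x])]
      have he : evens (x :: t) = x :: evens t := by
        simp only [evens]
        rw [List.filter_cons_of_pos (p := fun y => PySem.Int.mod y 2 == 0) hx]
      simp [he]
    · simp only [List.foldl_cons, hx]
      rw [if_neg (by simp [hx]), ih E]
      have he : evens (x :: t) = evens t := by
        simp only [evens]
        rw [List.filter_cons_of_neg (p := fun y => PySem.Int.mod y 2 == 0) (by simpa using hx)]
      simp [he]

lemma alt_eq (nums : List Int) :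
    find_three_smallest_even_alt nums = (isort (evens nums)).take 3 := by
  have := alt_inv nums []
  simpa [find_three_smallest_even_alt, isort] using this

-- ---- A-side ----
lemma ftsInner_enum (s used : List Int) :
    ftsInner s used = (PySem.List.enumerate s 0).foldl ftsStep (none, used) := by
  rw [ftsInner, PySem.List.enumerate_eq_map_pyRange (d := 0), List.foldl_map]
  simp [PySem.List.len]

-- once smallest_even is set to the minimum of the suffix, nothing changes
lemma pass_nochange (t : List Int) : ∀ (s0 m : Int) (used : List Int),
    (∀ v ∈ t, ¬ v < m) →
    (PySem.List.enumerate t s0).foldl ftsStep (some m, used) = (some m, used) := by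
  induction t with
  | nil => intro s0 m used _; simp [PySem.List.enumerate_nil]
  | cons x t ih =>
    intro s0 m used h
    rw [PySem.List.enumerate_cons, List.foldl_cons]
    have hc : ftsStep (some m, used) (s0, x) = (some m, used) := by
      simp [ftsStep, ftsCond, h x (by simp)]
    rw [hc]
    exact ih (s0 + 1) m used (fun v hv => h v (by simp [hv]))

lemma pass_eq (l : List Int) : ∀ (s0 : Int) (U : List Int) (k : Nat),
    l.Pairwise (· ≤ ·) → (∀ u ∈ U, u < s0) →
    (PySem.List.enumerate l s0).foldl ftsStep
        (none, U ++ ((((PySem.List.enumerate l s0).filter evp).take k).map Prod.fst)) =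
      (match ((PySem.List.enumerate l s0).filter evp)[k]? with
       | some p => (some p.2,
           (U ++ ((((PySem.List.enumerate l s0).filter evp).take k).map Prod.fst)) ++ [p.1])
       | none => (none, U ++ ((((PySem.List.enumerate l s0).filter evp).take k).map Prod.fst))) := by
  induction l with
  | nil => intro s0 U k _ _; simp [PySem.List.enumerate_nil]
  | cons x t ih =>
    intro s0 U k hp hU
    rcases List.pairwise_cons.mp hp with ⟨hx, ht⟩
    rw [PySem.List.enumerate_cons]
    by_cases hev : evp (s0, x) = true
    · -- head is even: it is the first element of the filtered list
      rw [List.filter_cons_of_pos hev]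
      cases k with
      | zero =>
        simp only [List.take_zero, List.map_nil, List.append_nil, List.foldl_cons]
        have hstep : ftsStep (none, U) (s0, x) = (some x, U ++ [s0]) := by
          have hnot : s0 ∉ U := fun hmem => absurd (hU s0 hmem) (by omega)
          simp [ftsStep, ftsCond, evp] at hev ⊢
          exact ⟨hnot, hev⟩
        rw [hstep, pass_nochange t (s0+1) x (U ++ [s0]) (fun v hv => not_lt.mpr (hx v hv))]
        simp
      | succ j =>
        simp only [List.take_succ_cons, List.map_cons, List.getElem?_cons_succ]
        have hstep : ∀ se rest, ftsStep (se, U ++ s0 :: rest) (s0, x) = (se, U ++ s0 :: rest) := by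
          intro se rest
          have : (U ++ s0 :: rest).contains s0 = true := by
            simp [List.contains_eq_mem]
          simp [ftsStep, ftsCond, this]
        rw [List.foldl_cons, hstep]
        have hU' : ∀ u ∈ U ++ [s0], u < s0 + 1 := by
          intro u hu; rcases List.mem_append.mp hu with h | h
          · exact lt_trans (hU u h) (by omega)
          · simp at h; omega
        have := ih (s0 + 1) (U ++ [s0]) j ht hU'
        simpa using this
    · -- head is odd: skipped by the evenness test, filtered list unchanged
      rw [List.filter_cons_of_neg (by simpa using hev)]
      rw [List.foldl_cons]
      have hstep : ∀ used, ftsStep (none, used) (s0, x) = (none, used) := by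
        intro used
        simp [ftsStep, ftsCond, evp] at hev ⊢
        intro _
        exact hev
      rw [hstep]
      exact ih (s0 + 1) U k ht (fun u hu => lt_trans (hU u hu) (by omega))

-- evens of the sorted list = insertion sort of evens of the input
lemma evens_sorted_eq (nums : List Int) :
    evens (PySem.List.sorted nums (fun x => x) false) = isort (evens nums) := by
  have hperm : (evens (PySem.List.sorted nums (fun x => x) false)).Perm (evens nums) :=
    (PySem.List.sorted_perm nums (fun x => x) false).filter _
  have hperm2 : (isort (evens nums)).Perm (evens nums) := by
    have h : ∀ (l acc : List Int),
        (l.foldl (fun a x => insEven x a) acc).Perm (acc ++ l) := by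
      intro l
      induction l with
      | nil => intro acc; simp
      | cons x t ih =>
        intro acc
        refine (ih (insEven x acc)).trans ?_
        exact ((insEven_perm x acc).append_right t).trans List.perm_middle.symm
    simpa [isort] using h (evens nums) []
  have hs1 : (evens (PySem.List.sorted nums (fun x => x) false)).Pairwise (· ≤ ·) := by
    have := PySem.List.sorted_pairwise nums (fun x => x)
    exact List.Pairwise.filter _ this
  have hs2 : (isort (evens nums)).Pairwise (· ≤ ·) := by
    have h : ∀ (l acc : List Int), acc.Pairwise (· ≤ ·) →
        (l.foldl (fun a x => insEven x a) acc).Pairwise (· ≤ ·) := by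
      intro l
      induction l with
      | nil => intro acc h; simpa
      | cons x t ih => intro acc h; exact ih _ (insEven_pairwise x acc h)
    exact h (evens nums) [] (by simp)
  exact List.Perm.eq_of_pairwise' hs1 hs2 (hperm.trans hperm2.symm)

-- A returns the first three even entries of the sorted list
lemma a_eq (nums : List Int) :
    find_three_smallest_even nums
      = (evens (PySem.List.sorted nums (fun x => x) false)).take 3 := by
  set s := PySem.List.sorted nums (fun x => x) false with hs
  have hpw : s.Pairwise (· ≤ ·) := by
    have := PySem.List.sorted_pairwise nums (fun x => x)
    simpa [hs] using this
  have hr3 : PySem.List.pyRange 0 3 1 = [0, 1, 2] := by decide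
  set EP := (PySem.List.enumerate s 0).filter evp with hEP
  have hpass : ∀ k : Nat,
      ftsInner s ((EP.take k).map Prod.fst) =
        (match EP[k]? with
         | some p => (some p.2, ((EP.take k).map Prod.fst) ++ [p.1])
         | none => (none, (EP.take k).map Prod.fst)) := by
    intro k
    have := pass_eq s 0 [] k hpw (by simp)
    rw [ftsInner_enum]
    simpa [hEP] using this
  have hmain : find_three_smallest_even nums = (EP.take 3).map Prod.snd := by
    rw [find_three_smallest_even]
    simp only [← hs, hr3, List.foldl_cons, List.foldl_nil]
    rcases hE : EP with _ | ⟨p1, EP1⟩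
    · have h0 := hpass 0; rw [hE] at h0; simp at h0
      simp [h0, hE]
    · rcases hE1 : EP1 with _ | ⟨p2, EP2⟩
      · have h0 := hpass 0; have h1 := hpass 1
        rw [hE, hE1] at h0 h1; simp at h0 h1
        simp [h0, h1, hE, hE1]
      · rcases hE2 : EP2 with _ | ⟨p3, EP3⟩
        · have h0 := hpass 0; have h1 := hpass 1; have h2 := hpass 2
          rw [hE, hE1, hE2] at h0 h1 h2; simp at h0 h1 h2
          simp [h0, h1, h2, hE, hE1, hE2]
        · have h0 := hpass 0; have h1 := hpass 1; have h2 := hpass 2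
          rw [hE, hE1, hE2] at h0 h1 h2; simp at h0 h1 h2
          simp [h0, h1, h2, hE, hE1, hE2]
  rw [hmain]
  have : EP.map Prod.snd = evens s := by
    rw [hEP, evens]
    have : ∀ (l : List (Int × Int)),
        (l.filter evp).map Prod.snd = (l.map Prod.snd).filter (fun x => PySem.Int.mod x 2 == 0) := by
      intro l
      induction l with
      | nil => rfl
      | cons p t ih =>
        by_cases h : evp p = true
        · rw [List.filter_cons_of_pos h, List.map_cons, List.map_cons,
              List.filter_cons_of_pos (by simpa [evp] using h), ih]
        · rw [List.filter_cons_of_neg h, List.map_cons,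
              List.filter_cons_of_neg (by simpa [evp] using h), ih]
    rw [this, PySem.List.map_snd_enumerate]
  rw [← this, List.map_take]

-- ===== VERDICT (by name: the statement is the Claim_ definition above) =====
theorem find_three_smallest_even_spec : Claim_equal_find_three_smallest_even := by
  intro nums _
  unfold Spec_find_three_smallest_even
  rw [a_eq, alt_eq, evens_sorted_eq]
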